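-- pv_equiv track=rewrite | github.com/thsformygod/Nav-pLDDT-IUPred | 04_validate_results/scripts/Validate_model.py | transform_target_list
-- ===== SOURCE A (Python) =====
-- def transform_target_list(feature_list, rule_type="short"):
--     """
--     Apply the transformation rules on a feature list.
--     - For "short": Continuous -2 <= 3 => 'T', else 'N'.
--     - For "long": Continuous -2 > 3 => 'T', else 'N'.
--     """
--     transformed_list = []
--     n = len(feature_list)
--     for i in range(n):
--         if feature_list[i] == 1 or feature_list[i] == -1:
--             transformed_list.append("N")
--         elif feature_list[i] == -2:
--             # Count the window size of continuous -2
--             count = 1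
--             # Look backward
--             j = i - 1
--             while j >= 0 and feature_list[j] == -2:
--                 count += 1
--                 j -= 1
--                 # Look forward
--             j = i + 1
--             while j < n and feature_list[j] == -2:
--                 count += 1
--                 j += 1
--                 # Apply the transformation rules
--
--
--             # region_boundary = 30, then short vs long is at 30 residues
--             # if region_boundary is a large number like 3000, then all residues are seen as hard missing
--             # (no considering for short or long, every residues of hard missing is counted)
--             region_boundary = 30
--
--             if rule_type == "short" and count <= region_boundary:
--                 transformed_list.append("T")
--             elif rule_type == "long" and count > region_boundary:
--                 transformed_list.append("T")
--             else:
--                 transformed_list.append("N")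
--     return transformed_list
-- ===== SOURCE B (Python) =====
-- def transform_target_list(feature_list, rule_type="short"):
--     """Single left-to-right pass: measure each maximal run of -2 once and label it as a block."""
--     out = []
--     n = len(feature_list)
--     i = 0
--     while i < n:
--         v = feature_list[i]
--         if v == -2:
--             j = i + 1
--             while j < n and feature_list[j] == -2:
--                 j += 1
--             run = j - i
--             label = "T" if ((rule_type == "short" and run <= 30)
--                             or (rule_type == "long" and run > 30)) else "N"
--             out.extend([label] * run)
--             i = j
--         else:
--             if v == 1 or v == -1:
--                 out.append("N")
--             i += 1
--     return out
-- ===== Notes on version B (the rewrite author's own statement) =====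
-- stated objective: alternative
-- what changed: Each maximal run of -2 is measured once in a single left-to-right pass and labelled as a block, instead of re-scanning backward and forward from every -2 position.
import Mathlib
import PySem

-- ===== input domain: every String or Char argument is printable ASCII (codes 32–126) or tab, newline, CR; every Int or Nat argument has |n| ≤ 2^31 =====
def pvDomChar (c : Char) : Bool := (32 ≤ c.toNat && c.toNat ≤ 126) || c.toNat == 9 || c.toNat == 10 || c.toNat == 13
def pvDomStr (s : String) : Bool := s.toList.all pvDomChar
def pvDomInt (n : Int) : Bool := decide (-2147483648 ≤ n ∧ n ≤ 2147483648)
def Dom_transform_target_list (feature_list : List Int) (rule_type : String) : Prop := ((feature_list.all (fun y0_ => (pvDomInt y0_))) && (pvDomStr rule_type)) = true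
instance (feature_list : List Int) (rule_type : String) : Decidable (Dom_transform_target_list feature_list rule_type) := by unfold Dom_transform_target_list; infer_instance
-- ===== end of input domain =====

-- B measures each maximal run of -2 once in a single left-to-right pass and labels the
-- whole run as a block, instead of A's backward+forward re-scan from every -2 position.

-- ===== PORT A =====
-- backward loop: "j = i - 1; while j >= 0 and feature_list[j] == -2: count += 1; j -= 1"
-- (j is always in range when compared with -2, so getD's default is never the decided value)
def pvBack (xs : List Int) : Nat → Nat
  | 0 => 0
  | i + 1 => if xs.getD i 0 = -2 then 1 + pvBack xs i else 0

-- forward loop: "j = i + 1; while j < n and feature_list[j] == -2: count += 1; j += 1"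
def pvFwd (xs : List Int) (j : Nat) : Nat :=
  if h : j < xs.length then
    if xs.getD j 0 = -2 then 1 + pvFwd xs (j + 1) else 0
  else 0
termination_by xs.length - j

-- one iteration of A's "for i in range(n)" body (the list appended in that iteration)
def pvStepA (xs : List Int) (rt : String) (i : Nat) : List String :=
  let v := xs.getD i 0
  if v = 1 ∨ v = -1 then ["N"]
  else if v = -2 then
    let count := 1 + pvBack xs i + pvFwd xs (i + 1)
    if rt = "short" ∧ count ≤ 30 then ["T"]
    else if rt = "long" ∧ 30 < count then ["T"]
    else ["N"]
  else []

def transform_target_list (feature_list : List Int) (rule_type : String) : List String :=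
  (List.range feature_list.length).foldl
    (fun acc i => acc ++ pvStepA feature_list rule_type i) []

-- ===== PORT B =====
def pvLabel (rt : String) (run : Nat) : String :=
  if (rt = "short" ∧ run ≤ 30) ∨ (rt = "long" ∧ 30 < run) then "T" else "N"

def transform_target_list_alt (feature_list : List Int) (rule_type : String) : List String :=
  match feature_list with
  | [] => []
  | x :: rest =>
    if x = -2 then
      -- inner while loop: scan the rest of the maximal -2 run once
      let run := (rest.takeWhile (fun y => y == -2)).length + 1
      List.replicate run (pvLabel rule_type run) ++
        transform_target_list_alt (rest.dropWhile (fun y => y == -2)) rule_type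
    else if x = 1 ∨ x = -1 then
      "N" :: transform_target_list_alt rest rule_type
    else
      transform_target_list_alt rest rule_type
termination_by feature_list.length
decreasing_by
  · have := List.length_dropWhile_le (fun y => y == (-2 : Int)) rest
    simp; omega
  · simp
  · simp

-- ===== PRECONDITION & SPEC =====
def Spec_transform_target_list (feature_list : List Int) (rule_type : String) (out : List String) : Prop := out = transform_target_list_alt feature_list rule_type
instance (feature_list : List Int) (rule_type : String) (out : List String) : Decidable (Spec_transform_target_list feature_list rule_type out) := by unfold Spec_transform_target_list; infer_instance

-- ===== CLAIM (what is proved, stated in full; the proofs are below) =====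
def Claim_equal_transform_target_list : Prop := ∀ (feature_list : List Int) (rule_type : String), Dom_transform_target_list feature_list rule_type → Spec_transform_target_list feature_list rule_type (transform_target_list feature_list rule_type)

-- ===== LEMMAS AND PROOFS =====

-- A as a flatMap over indices
theorem A_eq_flatMap (xs : List Int) (rt : String) :
    transform_target_list xs rt = (List.range xs.length).flatMap (pvStepA xs rt) := by
  unfold transform_target_list
  rw [PySem.List.foldl_append_eq_flatMap]
  simp

theorem fwd_append (zs ys : List Int) (j : Nat) :
    pvFwd (zs ++ ys) (zs.length + j) = pvFwd ys j := by
  fun_induction pvFwd ys j with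
  | case1 j h hv ih =>
    rw [pvFwd]
    rw [dif_pos (by simp; omega)]
    rw [List.getD_append_right _ _ _ _ (by omega), Nat.add_sub_cancel_left]
    rw [if_pos hv]
    have : zs.length + j + 1 = zs.length + (j + 1) := by omega
    rw [this, ih]
  | case2 j h hv =>
    rw [pvFwd]
    rw [dif_pos (by simp; omega)]
    rw [List.getD_append_right _ _ _ _ (by omega), Nat.add_sub_cancel_left]
    rw [if_neg hv]
  | case3 j h =>
    rw [pvFwd]
    rw [dif_neg (by simp; omega)]

theorem fwd_zero_of_head (ys : List Int) (hy : ys.getD 0 0 ≠ -2) : pvFwd ys 0 = 0 := by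
  rw [pvFwd]
  split
  · simp
  · rfl

theorem fwd_run (m : Nat) (ys : List Int) (h0 : pvFwd ys 0 = 0) :
    ∀ i, i ≤ m → pvFwd (List.replicate m (-2) ++ ys) i = m - i := by
  intro i hi
  induction hk : m - i generalizing i with
  | zero =>
    have him : i = m := by omega
    rw [him]
    have h := fwd_append (List.replicate m (-2)) ys 0
    simp only [List.length_replicate, Nat.add_zero] at h
    rw [h, h0]
  | succ k ih =>
    rw [pvFwd]
    rw [dif_pos (by simp; omega)]
    rw [List.getD_append _ _ _ i (by simp; omega)]
    rw [List.getD_replicate _ (by omega)]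
    rw [if_pos rfl]
    rw [ih (i + 1) (by omega) (by omega)]
    omega

theorem back_cons (c : Int) (hc : c ≠ -2) (rest : List Int) :
    ∀ i, pvBack (c :: rest) (i + 1) = pvBack rest i := by
  intro i
  induction i with
  | zero => simp [pvBack, hc]
  | succ i ih =>
    rw [pvBack, ih]
    rfl

theorem back_run (m : Nat) (ys : List Int) :
    ∀ i, i ≤ m → pvBack (List.replicate m (-2) ++ ys) i = i := by
  intro i
  induction i with
  | zero => intro _; rfl
  | succ i ih =>
    intro hi
    rw [pvBack]
    rw [List.getD_append _ _ _ i (by simp; omega)]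
    rw [List.getD_replicate _ (by omega), if_pos rfl, ih (by omega)]
    omega

theorem back_after (m : Nat) (ys : List Int) (hy : ys.getD 0 0 ≠ -2) :
    ∀ i, 1 ≤ i → pvBack (List.replicate m (-2) ++ ys) (m + i) = pvBack ys i := by
  intro i
  induction i with
  | zero => intro h; omega
  | succ i ih =>
    intro _
    have hm : m + (i + 1) = (m + i) + 1 := by omega
    rw [hm, pvBack]
    rw [List.getD_append_right _ _ _ _ (by simp), List.length_replicate,
        Nat.add_sub_cancel_left]
    rcases Nat.eq_zero_or_pos i with h0 | h1
    · subst h0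
      simp only [List.getD] at hy
      simp [pvBack, List.getD, hy]
    · rw [pvBack, ih h1]

theorem stepA_cons (c : Int) (hc : c ≠ -2) (rest : List Int) (rt : String) (i : Nat) :
    pvStepA (c :: rest) rt (i + 1) = pvStepA rest rt i := by
  unfold pvStepA
  have hget : (c :: rest).getD (i + 1) 0 = rest.getD i 0 := by simp
  have hfwd : pvFwd (c :: rest) (i + 1 + 1) = pvFwd rest (i + 1) := by
    have := fwd_append [c] rest (i + 1)
    simpa [Nat.add_comm] using this
  rw [hget, back_cons c hc rest i, hfwd]

theorem stepA_in_run (m : Nat) (ys : List Int) (rt : String) (hy : ys.getD 0 0 ≠ -2)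
    (i : Nat) (hi : i < m) :
    pvStepA (List.replicate m (-2) ++ ys) rt i = [pvLabel rt m] := by
  unfold pvStepA
  have hget : (List.replicate m (-2) ++ ys).getD i 0 = (-2 : Int) := by
    rw [List.getD_append _ _ _ i (by simp; omega), List.getD_replicate _ (by omega)]
  rw [hget]
  rw [if_neg (by decide), if_pos rfl]
  rw [back_run m ys i (Nat.le_of_lt hi)]
  rw [fwd_run m ys (fwd_zero_of_head ys hy) (i + 1) (by omega)]
  have hc : 1 + i + (m - (i + 1)) = m := by omega
  rw [hc]
  unfold pvLabel
  by_cases c1 : rt = "short" ∧ m ≤ 30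
  · rw [if_pos c1, if_pos (Or.inl c1)]
  · rw [if_neg c1]
    by_cases c2 : rt = "long" ∧ 30 < m
    · rw [if_pos c2, if_pos (Or.inr c2)]
    · rw [if_neg c2, if_neg (by tauto)]

theorem stepA_after (m : Nat) (ys : List Int) (rt : String) (hy : ys.getD 0 0 ≠ -2) (i : Nat) :
    pvStepA (List.replicate m (-2) ++ ys) rt (m + i) = pvStepA ys rt i := by
  unfold pvStepA
  have hget : (List.replicate m (-2) ++ ys).getD (m + i) 0 = ys.getD i 0 := by
    rw [List.getD_append_right _ _ _ _ (by simp), List.length_replicate,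
        Nat.add_sub_cancel_left]
  rw [hget]
  by_cases h1 : ys.getD i 0 = 1 ∨ ys.getD i 0 = -1
  · rw [if_pos h1, if_pos h1]
  · rw [if_neg h1, if_neg h1]
    by_cases h2 : ys.getD i 0 = -2
    · have hi1 : 1 ≤ i := by
        rcases Nat.eq_zero_or_pos i with h0 | h; · exact absurd h2 (h0 ▸ hy)
        exact h
      rw [if_pos h2, if_pos h2]
      have hfwd : pvFwd (List.replicate m (-2) ++ ys) (m + i + 1) = pvFwd ys (i + 1) := by
        have := fwd_append (List.replicate m (-2)) ys (i + 1)
        simpa [List.length_replicate, Nat.add_assoc] using this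
      rw [back_after m ys hy i hi1, hfwd]
    · rw [if_neg h2, if_neg h2]

theorem flatMap_range_const {α : Type} (f : Nat → List α) (c : α) (m : Nat)
    (h : ∀ i, i < m → f i = [c]) :
    (List.range m).flatMap f = List.replicate m c := by
  induction m with
  | zero => simp
  | succ m ih =>
    rw [List.range_succ, List.flatMap_append,
        ih (fun i hi => h i (by omega)), List.replicate_succ']
    simp [h m (by omega)]

theorem dropWhile_head (l : List Int) :
    (l.dropWhile (fun y => y == -2)).getD 0 0 ≠ -2 := by
  induction l with
  | nil => decide
  | cons x t ih =>
    rw [List.dropWhile_cons]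
    split
    · exact ih
    · next h => simpa using fun hx => h (by simp [hx])

theorem takeWhile_eq_replicate (l : List Int) :
    l.takeWhile (fun y => y == -2)
      = List.replicate (l.takeWhile (fun y => y == -2)).length (-2) := by
  rw [List.eq_replicate_length]
  intro b hb
  have := List.mem_takeWhile_imp hb
  simpa using this

theorem flat_cons (c : Int) (hc : c ≠ -2) (rest : List Int) (rt : String) :
    transform_target_list (c :: rest) rt
      = pvStepA (c :: rest) rt 0 ++ transform_target_list rest rt := by
  rw [A_eq_flatMap, A_eq_flatMap]
  rw [show (c :: rest).length = rest.length + 1 from rfl]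
  rw [List.range_succ_eq_map, List.flatMap_cons, List.flatMap_map]
  congr 1
  have : (fun i => pvStepA (c :: rest) rt (Nat.succ i)) = pvStepA rest rt := by
    funext i
    exact stepA_cons c hc rest rt i
  rw [this]

theorem flat_run (m : Nat) (ys : List Int) (rt : String) (hy : ys.getD 0 0 ≠ -2) :
    transform_target_list (List.replicate m (-2) ++ ys) rt
      = List.replicate m (pvLabel rt m) ++ transform_target_list ys rt := by
  rw [A_eq_flatMap, A_eq_flatMap]
  rw [show (List.replicate m (-2:Int) ++ ys).length = m + ys.length by simp]
  rw [List.range_add, List.flatMap_append, List.flatMap_map]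
  congr 1
  · exact flatMap_range_const _ _ _ (fun i hi => stepA_in_run m ys rt hy i hi)
  · have : (fun i => pvStepA (List.replicate m (-2) ++ ys) rt (m + i)) = pvStepA ys rt := by
      funext i
      exact stepA_after m ys rt hy i
    rw [this]

theorem ab_aux : ∀ (n : Nat) (xs : List Int) (rt : String), xs.length ≤ n →
    transform_target_list xs rt = transform_target_list_alt xs rt := by
  intro n
  induction n with
  | zero =>
    intro xs rt h
    have hx : xs = [] := by cases xs <;> simp_all
    subst hx
    rw [A_eq_flatMap]
    simp [transform_target_list_alt]
  | succ n ih =>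
    intro xs rt hlen
    match xs with
    | [] =>
      rw [A_eq_flatMap]
      simp [transform_target_list_alt]
    | c :: rest =>
      by_cases hc : c = -2
      · subst hc
        have hps := takeWhile_eq_replicate rest
        have hrest : rest.takeWhile (fun y => y == -2) ++ rest.dropWhile (fun y => y == -2)
            = rest := List.takeWhile_append_dropWhile
        have hxs : (-2 : Int) :: rest
            = List.replicate ((rest.takeWhile (fun y => y == -2)).length + 1) (-2)
              ++ rest.dropWhile (fun y => y == -2) := by
          rw [List.replicate_succ, List.cons_append, ← hps, hrest]
        have hy := dropWhile_head rest
        have hq : (rest.dropWhile (fun y => y == -2)).length ≤ n := by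
          have h1 := List.length_dropWhile_le (fun y => y == (-2:Int)) rest
          simp at hlen
          omega
        have hA : transform_target_list ((-2 : Int) :: rest) rt
            = List.replicate ((rest.takeWhile (fun y => y == -2)).length + 1)
                (pvLabel rt ((rest.takeWhile (fun y => y == -2)).length + 1))
              ++ transform_target_list (rest.dropWhile (fun y => y == -2)) rt := by
          conv_lhs => rw [hxs]
          exact flat_run _ _ rt hy
        rw [hA, ih _ rt hq]
        conv_rhs => rw [transform_target_list_alt]
        rw [if_pos rfl]
      · have hA := flat_cons c hc rest rt
        have hq : rest.length ≤ n := by simp at hlen; omega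
        by_cases h1 : c = 1 ∨ c = -1
        · have hstep : pvStepA (c :: rest) rt 0 = ["N"] := by
            unfold pvStepA
            rw [show (c :: rest).getD 0 0 = c from rfl]
            rw [if_pos h1]
          rw [hA, hstep, ih rest rt hq]
          conv_rhs => rw [transform_target_list_alt]
          rw [if_neg hc, if_pos h1]
          rfl
        · have hstep : pvStepA (c :: rest) rt 0 = [] := by
            unfold pvStepA
            rw [show (c :: rest).getD 0 0 = c from rfl]
            rw [if_neg h1, if_neg hc]
          rw [hA, hstep, ih rest rt hq]
          conv_rhs => rw [transform_target_list_alt]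
          rw [if_neg hc, if_neg h1]
          rfl

-- ===== VERDICT (by name: the statement is the Claim_ definition above) =====
theorem transform_target_list_spec : Claim_equal_transform_target_list := by
  intro xs rt _
  unfold Spec_transform_target_list
  exact ab_aux xs.length xs rt le_rfl
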